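-- pv_equiv track=rewrite | github.com/ComPlat/chem-spectra-app | chem_spectra/lib/shared/calc.py | get_curve_endpoint
-- ===== SOURCE A (Python) =====
-- def get_curve_endpoint(xs, ys, x1, x2):
--     iL, iU = 0, 0
--     xL, xU = x1, x2
--     if x1 > x2:
--         xL, xU = x2, x1
--     toggle = False
--     for idx, val in enumerate(xs):
--         if not toggle and (xL <= val and val <= xU):
--             toggle = True
--             iL = idx
--         if toggle and not (xL <= val and val <= xU):
--             toggle = False
--             iU = idx
--     return iL, iU
-- ===== SOURCE B (Python) =====
-- def get_curve_endpoint(xs, ys, x1, x2):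
--     lo, hi = (x2, x1) if x1 > x2 else (x1, x2)
--     n = len(xs)
--     iL = 0
--     for i in range(n - 1, 0, -1):
--         if lo <= xs[i] <= hi and not (lo <= xs[i - 1] <= hi):
--             iL = i
--             break
--     iU = 0
--     for i in range(n - 1, 0, -1):
--         if not (lo <= xs[i] <= hi) and lo <= xs[i - 1] <= hi:
--             iU = i
--             break
--     return iL, iU
-- ===== Notes on version B (the rewrite author's own statement) =====
-- stated objective: alternative
-- what changed: Replaces A's single forward pass with a toggle state machine by two independent backward scans that stop (break) at the last in-range run start (iL) and the last in-range-to-out-of-range transition (iU).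
import Mathlib
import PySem

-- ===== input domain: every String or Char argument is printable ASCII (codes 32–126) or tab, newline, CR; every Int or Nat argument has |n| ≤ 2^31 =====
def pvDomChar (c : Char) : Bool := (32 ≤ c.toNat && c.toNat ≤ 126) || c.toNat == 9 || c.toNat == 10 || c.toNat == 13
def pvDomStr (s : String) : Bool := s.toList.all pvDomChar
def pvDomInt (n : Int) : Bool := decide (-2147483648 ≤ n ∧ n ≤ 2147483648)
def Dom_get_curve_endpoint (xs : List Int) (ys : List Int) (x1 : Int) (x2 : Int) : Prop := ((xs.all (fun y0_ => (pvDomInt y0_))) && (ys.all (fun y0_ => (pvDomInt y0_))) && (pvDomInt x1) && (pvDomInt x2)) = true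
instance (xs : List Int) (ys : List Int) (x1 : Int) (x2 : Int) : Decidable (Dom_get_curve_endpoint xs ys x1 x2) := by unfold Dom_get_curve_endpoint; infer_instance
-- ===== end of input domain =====

-- B replaces A's single forward toggle state machine by two backward scans for the last
-- run-start / run-end transition (objective: alternative decomposition, same O(n) cost).

-- ===== PORT A =====
-- the loop body of A: state is (iL, iU, toggle), p is (idx, val)
def pvStepA (xL xU : Int) (s : Int × Int × Bool) (p : Int × Int) : Int × Int × Bool :=
  let s1 := if !s.2.2 && (xL ≤ p.2 && p.2 ≤ xU) then (p.1, s.2.1, true) else s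
  if s1.2.2 && !(xL ≤ p.2 && p.2 ≤ xU) then (s1.1, p.1, false) else s1

def get_curve_endpoint (xs : List Int) (ys : List Int) (x1 : Int) (x2 : Int) : Int × Int :=
  let xL := if x1 > x2 then x2 else x1
  let xU := if x1 > x2 then x1 else x2
  let st := (PySem.List.enumerate xs 0).foldl (pvStepA xL xU) (0, 0, false)
  (st.1, st.2.1)

-- ===== PORT B =====
-- Source B's first loop: i from n-1 down to 1, first i with xs[i] in range and xs[i-1] not
def pvGoL (xs : List Int) (lo hi : Int) : Nat → Int
  | 0 => 0
  | i+1 =>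
    if (lo ≤ xs.getD (i+1) 0 && xs.getD (i+1) 0 ≤ hi)
        && !(lo ≤ xs.getD i 0 && xs.getD i 0 ≤ hi)
    then ((i : Int) + 1) else pvGoL xs lo hi i

-- Source B's second loop: first i (from the top) with xs[i] out of range and xs[i-1] in range
def pvGoU (xs : List Int) (lo hi : Int) : Nat → Int
  | 0 => 0
  | i+1 =>
    if !(lo ≤ xs.getD (i+1) 0 && xs.getD (i+1) 0 ≤ hi)
        && (lo ≤ xs.getD i 0 && xs.getD i 0 ≤ hi)
    then ((i : Int) + 1) else pvGoU xs lo hi i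

def get_curve_endpoint_alt (xs : List Int) (ys : List Int) (x1 : Int) (x2 : Int) : Int × Int :=
  let lo := if x1 > x2 then x2 else x1
  let hi := if x1 > x2 then x1 else x2
  (pvGoL xs lo hi (xs.length - 1), pvGoU xs lo hi (xs.length - 1))

-- ===== PRECONDITION & SPEC =====
def Spec_get_curve_endpoint (xs : List Int) (ys : List Int) (x1 : Int) (x2 : Int) (out : Int × Int) : Prop := out = get_curve_endpoint_alt xs ys x1 x2
instance (xs : List Int) (ys : List Int) (x1 : Int) (x2 : Int) (out : Int × Int) : Decidable (Spec_get_curve_endpoint xs ys x1 x2 out) := by unfold Spec_get_curve_endpoint; infer_instance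

-- ===== CLAIM (what is proved, stated in full; the proofs are below) =====
def Claim_equal_get_curve_endpoint : Prop := ∀ (xs : List Int) (ys : List Int) (x1 : Int) (x2 : Int), Dom_get_curve_endpoint xs ys x1 x2 → Spec_get_curve_endpoint xs ys x1 x2 (get_curve_endpoint xs ys x1 x2)

-- ===== LEMMAS AND PROOFS =====
lemma pv_getD_append_lt (xs : List Int) (v : Int) (i : Nat) (h : i < xs.length) :
    (xs ++ [v]).getD i 0 = xs.getD i 0 := by
  simp [List.getD, List.getElem?_append_left h]

lemma pv_getD_append_self (xs : List Int) (v : Int) :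
    (xs ++ [v]).getD xs.length 0 = v := by
  simp [List.getD]

lemma pvGoL_append (xs : List Int) (v lo hi : Int) :
    ∀ i, i < xs.length → pvGoL (xs ++ [v]) lo hi i = pvGoL xs lo hi i := by
  intro i
  induction i with
  | zero => intro _; simp [pvGoL]
  | succ j ih =>
    intro h
    have h1 : j + 1 < xs.length := h
    have h0 : j < xs.length := Nat.lt_of_succ_lt h
    simp only [pvGoL, pv_getD_append_lt xs v _ h1, pv_getD_append_lt xs v _ h0,
      ih h0]

lemma pvGoU_append (xs : List Int) (v lo hi : Int) :
    ∀ i, i < xs.length → pvGoU (xs ++ [v]) lo hi i = pvGoU xs lo hi i := by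
  intro i
  induction i with
  | zero => intro _; simp [pvGoU]
  | succ j ih =>
    intro h
    have h1 : j + 1 < xs.length := h
    have h0 : j < xs.length := Nat.lt_of_succ_lt h
    simp only [pvGoU, pv_getD_append_lt xs v _ h1, pv_getD_append_lt xs v _ h0,
      ih h0]

-- the toggle after processing xs: xs nonempty and its last element is in range
def pvTog (xs : List Int) (lo hi : Int) : Bool :=
  !xs.isEmpty && (lo ≤ xs.getD (xs.length - 1) 0 && xs.getD (xs.length - 1) 0 ≤ hi)

lemma pv_main (lo hi : Int) (xs : List Int) :
    (PySem.List.enumerate xs 0).foldl (pvStepA lo hi) (0, 0, false)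
      = (pvGoL xs lo hi (xs.length - 1), pvGoU xs lo hi (xs.length - 1), pvTog xs lo hi) := by
  induction xs using List.reverseRecOn with
  | nil => simp [PySem.List.enumerate_nil, pvGoL, pvGoU, pvTog]
  | append_singleton xs v ih =>
    rw [PySem.List.enumerate_append, List.foldl_append, ih]
    have hnil : PySem.List.enumerate [v] ((0 : Int) + xs.length) = [((xs.length : Int), v)] := by
      simp [PySem.List.enumerate_cons, PySem.List.enumerate_nil]
    rw [hnil]
    simp only [List.foldl_cons, List.foldl_nil]
    rcases List.eq_nil_or_concat' xs with h | ⟨ws, w, hw⟩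
    · subst h
      cases hv : (lo ≤ v && v ≤ hi) <;>
        simp [pvStepA, pvGoL, pvGoU, pvTog, hv]
    · -- xs nonempty, length = m + 1
      have hne : xs ≠ [] := by subst hw; simp
      obtain ⟨m, hm⟩ : ∃ m, xs.length = m + 1 := by
        cases xs with
        | nil => exact absurd rfl hne
        | cons a t => exact ⟨t.length, by simp⟩
      have hmlt : m < xs.length := by omega
      have hlen1 : (xs ++ [v]).length - 1 = m + 1 := by simp [hm]
      have hgd1 : (xs ++ [v]).getD (m + 1) 0 = v := by
        have := pv_getD_append_self xs v; rwa [hm] at this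
      have hgd0 : (xs ++ [v]).getD m 0 = xs.getD m 0 := pv_getD_append_lt xs v m hmlt
      have htog : pvTog xs lo hi
          = (lo ≤ xs.getD m 0 && xs.getD m 0 ≤ hi) := by
        simp [pvTog, hne, hm]
      have htog' : pvTog (xs ++ [v]) lo hi = (lo ≤ v && v ≤ hi) := by
        simp [pvTog, hlen1, hgd1]
      rw [hlen1, htog']
      have hGL : pvGoL (xs ++ [v]) lo hi (m + 1)
          = if (lo ≤ v && v ≤ hi) && !(lo ≤ xs.getD m 0 && xs.getD m 0 ≤ hi)
            then ((m : Int) + 1) else pvGoL xs lo hi m := by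
        simp only [pvGoL, hgd1, hgd0, pvGoL_append xs v lo hi m hmlt]
      have hGU : pvGoU (xs ++ [v]) lo hi (m + 1)
          = if !(lo ≤ v && v ≤ hi) && (lo ≤ xs.getD m 0 && xs.getD m 0 ≤ hi)
            then ((m : Int) + 1) else pvGoU xs lo hi m := by
        simp only [pvGoU, hgd1, hgd0, pvGoU_append xs v lo hi m hmlt]
      have hlen0 : xs.length - 1 = m := by omega
      rw [hlen0, hGL, hGU, htog, hm]
      cases hP : (lo ≤ xs.getD m 0 && xs.getD m 0 ≤ hi) <;>
        cases hv : (lo ≤ v && v ≤ hi) <;>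
          simp [pvStepA, hP, hv]

-- ===== VERDICT (by name: the statement is the Claim_ definition above) =====
theorem get_curve_endpoint_spec : Claim_equal_get_curve_endpoint := by
  intro xs ys x1 x2 _
  unfold Spec_get_curve_endpoint get_curve_endpoint get_curve_endpoint_alt
  simp only [pv_main]
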